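-- pv_equiv track=rewrite | github.com/valeeraZ/Sorbonne_AAGA | Project/remy.py | gen_combs
-- ===== SOURCE A (Python) =====
-- def gen_combs(n):
--     """
--     generates all possible lists of size `n`
--     where for each list `l`, `l[i]<=i forall i in len(l)`
--     """
--     combs = [[]]
--     for _ in range(n):
--         combs_tmp = []
--         for comb in combs:
--             for i in range(len(comb) + 1):
--                 combs_tmp.append(comb + [i])
--         combs = combs_tmp.copy()
--
--     return combs
-- ===== SOURCE B (Python) =====
-- def gen_combs(n):
--     """
--     generates all possible lists of size `n`
--     where for each list `l`, `l[i]<=i forall i in len(l)`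
--     """
--     total = 1
--     for i in range(1, n + 1):
--         total *= i
--     out = []
--     for k in range(total):
--         rem = k
--         l = []
--         for i in range(n - 1, -1, -1):
--             l.append(rem % (i + 1))
--             rem //= (i + 1)
--         l.reverse()
--         out.append(l)
--     return out
-- ===== Notes on version B (the rewrite author's own statement) =====
-- stated objective: alternative
-- what changed: Instead of growing all prefixes layer by layer through repeated passes over an exponentially large intermediate list, B computes the factorial of n with one multiplication loop and factoradic-decodes each index of that range directly into its length-n sequence, producing the same lexicographic order.
import Mathlib
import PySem

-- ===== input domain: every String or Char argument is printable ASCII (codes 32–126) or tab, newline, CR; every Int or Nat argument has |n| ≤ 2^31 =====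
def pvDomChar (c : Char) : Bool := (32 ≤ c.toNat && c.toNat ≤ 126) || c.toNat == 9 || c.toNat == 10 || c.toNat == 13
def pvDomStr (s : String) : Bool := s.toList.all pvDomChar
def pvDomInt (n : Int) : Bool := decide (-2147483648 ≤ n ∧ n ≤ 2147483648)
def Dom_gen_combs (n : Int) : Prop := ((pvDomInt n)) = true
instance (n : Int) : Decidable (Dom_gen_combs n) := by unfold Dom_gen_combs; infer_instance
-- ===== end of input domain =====

-- B replaces A's layer-by-layer prefix growth by computing the factorial of n with a loop and
-- factoradic-decoding each index into its sequence (alternative decomposition, same output order).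

-- ===== PORT A =====
def gen_combs (n : Int) : List (List Int) :=
  (PySem.List.pyRange 0 n 1).foldl
    (fun combs _ =>
      combs.foldl
        (fun combs_tmp comb =>
          (PySem.List.pyRange 0 ((comb.length : Int) + 1) 1).foldl
            (fun acc i => acc ++ [comb ++ [i]]) combs_tmp)
        [])
    [[]]

-- ===== PORT B =====
def gen_combs_alt (n : Int) : List (List Int) :=
  let total : Int := (PySem.List.pyRange 1 (n + 1) 1).foldl (fun acc i => acc * i) 1
  (PySem.List.pyRange 0 total 1).foldl
    (fun out k =>
      let res := (PySem.List.pyRange (n - 1) (-1) (-1)).foldl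
        (fun (p : Int × List Int) i =>
          (PySem.Int.floordiv p.1 (i + 1), p.2 ++ [PySem.Int.mod p.1 (i + 1)]))
        (k, [])
      out ++ [res.2.reverse])
    []

-- ===== PRECONDITION & SPEC =====
def Spec_gen_combs (n : Int) (out : List (List Int)) : Prop := out = gen_combs_alt n
instance (n : Int) (out : List (List Int)) : Decidable (Spec_gen_combs n out) := by unfold Spec_gen_combs; infer_instance

-- ===== CLAIM (what is proved, stated in full; the proofs are below) =====
def Claim_equal_gen_combs : Prop := ∀ (n : Int), Dom_gen_combs n → Spec_gen_combs n (gen_combs n)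

-- ===== LEMMAS AND PROOFS =====

/-- One layer of A's growth: extend every list by each admissible next digit. -/
def stepN (combs : List (List Int)) : List (List Int) :=
  combs.flatMap (fun c => (List.range (c.length + 1)).map (fun i : Nat => c ++ [(i : Int)]))

/-- Factoradic decode, mixed radices (1,2,...,m) left to right, rightmost digit fastest. -/
def decodeN : Nat → Nat → List Int
  | 0, _ => []
  | (m+1), k => decodeN m (k / (m+1)) ++ [((k % (m+1) : Nat) : Int)]

/-- Integer-level reversed decode, as B's inner loop produces it. -/
def decodeRev : Nat → Int → List Int
  | 0, _ => []
  | (m+1), k => PySem.Int.mod k ((m : Int) + 1) :: decodeRev m (PySem.Int.floordiv k ((m : Int) + 1))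

lemma length_decodeN (m k : Nat) : (decodeN m k).length = m := by
  induction m generalizing k with
  | zero => rfl
  | succ m ih => simp [decodeN, ih]

lemma decodeRev_natCast (m k : Nat) :
    decodeRev m (k : Int) = (decodeN m k).reverse := by
  induction m generalizing k with
  | zero => rfl
  | succ m ih =>
    have h1 : ((m : Int) + 1) = ((m + 1 : Nat) : Int) := by push_cast; ring
    simp only [decodeRev, decodeN, h1, PySem.Int.mod_natCast, PySem.Int.floordiv_natCast,
      ih, List.reverse_append, List.reverse_cons, List.reverse_nil]
    rfl

lemma decodeN_decompose (m q r : Nat) (hr : r < m + 1) :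
    decodeN (m+1) (q * (m+1) + r) = decodeN m q ++ [(r : Int)] := by
  have hdiv : (q * (m+1) + r) / (m+1) = q := by
    rw [Nat.add_comm, Nat.add_mul_div_right _ _ (Nat.succ_pos m), Nat.div_eq_of_lt hr]
    omega
  have hmod : (q * (m+1) + r) % (m+1) = r := by
    rw [Nat.add_comm, Nat.add_mul_mod_self_right, Nat.mod_eq_of_lt hr]
  simp [decodeN, hdiv, hmod]

lemma range_mul_flatMap (a b : Nat) :
    List.range (a * b) = (List.range a).flatMap (fun q => (List.range b).map (fun r => q * b + r)) := by
  induction a with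
  | zero => simp
  | succ a ih =>
    have h : (a + 1) * b = a * b + b := by ring
    rw [h, List.range_add, List.range_succ, List.flatMap_append, ← ih]
    simp [Nat.mul_comm]

/-- A's layers equal the factoradic enumeration. -/
lemma iter_step_eq (m : Nat) :
    stepN^[m] [[]] = (List.range m.factorial).map (decodeN m) := by
  induction m with
  | zero => simp [decodeN]
  | succ m ih =>
    rw [Function.iterate_succ_apply', ih]
    have hfact : (m+1).factorial = m.factorial * (m+1) := by
      rw [Nat.factorial_succ]; ring
    rw [hfact, range_mul_flatMap, List.map_flatMap]
    unfold stepN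
    rw [List.flatMap_map]
    apply List.flatMap_congr
    intro q _
    calc (List.range ((decodeN m q).length + 1)).map (fun i : Nat => decodeN m q ++ [(i : Int)])
        = (List.range (m+1)).map (fun r => decodeN (m+1) (q*(m+1)+r)) := by
          rw [length_decodeN]
          exact List.map_congr_left (fun r hr => by
            rw [List.mem_range] at hr
            exact (decodeN_decompose m q r hr).symm)
      _ = ((List.range (m+1)).map (fun r => q*(m+1)+r)).map (decodeN (m+1)) := by
          rw [List.map_map]; rfl

lemma stepN_cons (c : List Int) (cs : List (List Int)) :
    stepN (c :: cs)
      = (List.range (c.length + 1)).map (fun i : Nat => c ++ [(i : Int)]) ++ stepN cs := by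
  simp [stepN]

/-- A's inner double loop is one application of stepN, appended to the accumulator. -/
lemma bodyA_eq (combs acc : List (List Int)) :
    combs.foldl
      (fun combs_tmp comb =>
        (PySem.List.pyRange 0 ((comb.length : Int) + 1) 1).foldl
          (fun a i => a ++ [comb ++ [i]]) combs_tmp) acc
    = acc ++ stepN combs := by
  induction combs generalizing acc with
  | nil => simp [stepN]
  | cons c cs ih =>
    rw [List.foldl_cons, ih, stepN_cons]
    rw [PySem.List.foldl_append_singleton_eq_map (fun i => c ++ [i])]
    have h : ((c.length : Int) + 1) = ((c.length + 1 : Nat) : Int) := by push_cast; ring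
    rw [h, PySem.List.pyRange_zero_nat, List.map_map, List.append_assoc]
    rfl

/-- A's port computes the iterated layers. -/
lemma gen_combs_eq_iter (n : Int) : gen_combs n = stepN^[n.toNat] [[]] := by
  unfold gen_combs
  rw [PySem.List.pyRange_zero n]
  generalize n.toNat = m
  induction m with
  | zero => simp
  | succ m ih =>
    rw [List.range_succ, List.map_append, List.foldl_append, ih,
      Function.iterate_succ_apply']
    simp only [List.map_cons, List.map_nil, List.foldl_cons, List.foldl_nil]
    rw [bodyA_eq]
    rfl

/-- B's inner loop accumulates the reversed decode. -/
lemma inner_loop_eq (m : Nat) (k : Int) (acc : List Int) :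
    ((PySem.List.pyRange ((m : Int) - 1) (-1) (-1)).foldl
      (fun (p : Int × List Int) i =>
        (PySem.Int.floordiv p.1 (i + 1), p.2 ++ [PySem.Int.mod p.1 (i + 1)]))
      (k, acc)).2 = acc ++ decodeRev m k := by
  induction m generalizing k acc with
  | zero =>
    rw [PySem.List.pyRange_neg_one_eq_nil (by norm_num)]
    simp [decodeRev]
  | succ m ih =>
    have h1 : ((m + 1 : Nat) : Int) - 1 = (m : Int) := by push_cast; ring
    rw [h1, PySem.List.pyRange_neg_one_cons (by omega : (-1 : Int) < (m : Int)),
      List.foldl_cons]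
    simp only []
    rw [ih]
    simp [decodeRev, List.append_assoc]

/-- The factorial loop, on a natural upper bound. -/
lemma fact_loop_nat (m : Nat) :
    (PySem.List.pyRange 1 ((m : Int) + 1) 1).foldl (fun acc i => acc * i) 1
      = (m.factorial : Int) := by
  induction m with
  | zero =>
    rw [PySem.List.pyRange_one_eq_nil (by norm_num)]
    simp
  | succ m ih =>
    have h : ((m + 1 : Nat) : Int) + 1 = ((m : Int) + 1) + 1 := by push_cast; ring
    rw [h, PySem.List.pyRange_one_succ_right (by omega : (1:Int) ≤ (m : Int) + 1),
      List.foldl_append, ih]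
    simp only [List.foldl_cons, List.foldl_nil]
    push_cast [Nat.factorial_succ]
    ring

/-- The factorial loop for any Int bound. -/
lemma fact_loop_eq (n : Int) :
    (PySem.List.pyRange 1 (n + 1) 1).foldl (fun acc i => acc * i) 1
      = ((n.toNat).factorial : Int) := by
  rcases (by omega : n ≤ 0 ∨ 0 < n) with h | h
  · rw [PySem.List.pyRange_one_eq_nil (by omega)]
    have : n.toNat = 0 := by omega
    simp [this]
  · have : n = (n.toNat : Int) := by omega
    rw [this]
    exact fact_loop_nat n.toNat

/-- B's per-index inner computation is the factoradic decode. -/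
lemma inner_decode_eq (n : Int) (k : Nat) :
    (((PySem.List.pyRange (n - 1) (-1) (-1)).foldl
      (fun (p : Int × List Int) i =>
        (PySem.Int.floordiv p.1 (i + 1), p.2 ++ [PySem.Int.mod p.1 (i + 1)]))
      ((k : Int), [])).2).reverse = decodeN n.toNat k := by
  have hr : PySem.List.pyRange (n - 1) (-1) (-1)
      = PySem.List.pyRange ((n.toNat : Int) - 1) (-1) (-1) := by
    rcases (by omega : n ≤ 0 ∨ 0 < n) with h | h
    · rw [PySem.List.pyRange_neg_one_eq_nil (by omega : n - 1 ≤ -1),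
        PySem.List.pyRange_neg_one_eq_nil (by omega : (n.toNat : Int) - 1 ≤ -1)]
    · congr 1; omega
  rw [hr, inner_loop_eq, decodeRev_natCast]
  simp

/-- B's port computes the factoradic enumeration. -/
lemma gen_combs_alt_eq (n : Int) :
    gen_combs_alt n = (List.range (n.toNat).factorial).map (decodeN n.toNat) := by
  unfold gen_combs_alt
  simp only [fact_loop_eq]
  rw [PySem.List.foldl_append_singleton_eq_map
    (fun k => (((PySem.List.pyRange (n - 1) (-1) (-1)).foldl
      (fun (p : Int × List Int) i =>
        (PySem.Int.floordiv p.1 (i + 1), p.2 ++ [PySem.Int.mod p.1 (i + 1)]))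
      (k, [])).2).reverse)]
  rw [PySem.List.pyRange_zero_nat, List.map_map, List.nil_append]
  exact List.map_congr_left (fun k _ => inner_decode_eq n k)

-- ===== VERDICT (by name: the statement is the Claim_ definition above) =====
theorem gen_combs_spec : Claim_equal_gen_combs := by
  intro n _
  unfold Spec_gen_combs
  rw [gen_combs_eq_iter, iter_step_eq, gen_combs_alt_eq]
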